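-- pv_equiv track=rewrite | github.com/jonathan-murmu/string_calculator | string_calculator/implementations.py | extract_delimiter_and_numbers
-- ===== SOURCE A (Python) =====
-- from typing import List, Tuple
--
-- def extract_delimiter_and_numbers(input_str: str) -> Tuple[str, str]:
--     """
--     Extract multiple delimiters and numbers string from the input.
--
--     Args:
--         input_str (str): The input string to process, in the format "//[delimiter1][delimiter2]...[delimiterN]\n[numbers]".
--
--     Returns:
--         Tuple[str, str]: A tuple containing (special_delimiter, numbers_str)
--                          where all original delimiters are replaced with the special_delimiter
--     """
--     # Special marker to replace all delimiters
--     special_delimiter = "__MULTI_DELIM__"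
--
--     # Find the position of the newline that separates delimiters from numbers
--     newline_pos = input_str.find('\n')
--     if newline_pos == -1:
--         return ',', input_str
--
--     # Extract the delimiters section and the numbers section
--     delimiters_section = input_str[2:newline_pos]
--     numbers_str = input_str[newline_pos + 1:]
--
--     # Extract all delimiters enclosed in square brackets
--     delimiters = []
--     start_pos = 0
--     while start_pos < len(delimiters_section):
--         open_bracket = delimiters_section.find('[', start_pos)
--         if open_bracket == -1:
--             break
--
--         close_bracket = delimiters_section.find(']', open_bracket)
--         if close_bracket == -1:
--             break
--
--         delimiter = delimiters_section[open_bracket + 1:close_bracket]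
--         delimiters.append(delimiter)
--         start_pos = close_bracket + 1
--
--     # Replace all occurrences of each delimiter with the special delimiter
--     for delimiter in delimiters:
--         numbers_str = numbers_str.replace(delimiter, special_delimiter)
--
--     # Replace newlines with the special delimiter as well
--     numbers_str = numbers_str.replace('\n', special_delimiter)
--
--     return special_delimiter, numbers_str
-- ===== SOURCE B (Python) =====
-- def extract_delimiter_and_numbers(input_str):
--     special_delimiter = "__MULTI_DELIM__"
--     newline_pos = input_str.find('\n')
--     if newline_pos == -1:
--         return ',', input_str
--     numbers_str = input_str[newline_pos + 1:]
--
--     # single character-by-character state machine instead of repeated find() scans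
--     delimiters = []
--     buf = None  # None = outside brackets; list of chars = inside a bracket
--     for ch in input_str[2:newline_pos]:
--         if buf is None:
--             if ch == '[':
--                 buf = []
--         elif ch == ']':
--             delimiters.append(''.join(buf))
--             buf = None
--         else:
--             buf.append(ch)
--
--     for d in delimiters + ['\n']:
--         numbers_str = numbers_str.replace(d, special_delimiter)
--     return special_delimiter, numbers_str
-- ===== Notes on version B (the rewrite author's own statement) =====
-- stated objective: alternative
-- what changed: The bracket-delimiter extraction is rewritten as a single character-by-character state-machine pass (a buffer tracks inside/outside a bracket) instead of A's repeated index-based find scans, and the final replacements run as one fold over the delimiter list extended with the newline.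
import Mathlib
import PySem

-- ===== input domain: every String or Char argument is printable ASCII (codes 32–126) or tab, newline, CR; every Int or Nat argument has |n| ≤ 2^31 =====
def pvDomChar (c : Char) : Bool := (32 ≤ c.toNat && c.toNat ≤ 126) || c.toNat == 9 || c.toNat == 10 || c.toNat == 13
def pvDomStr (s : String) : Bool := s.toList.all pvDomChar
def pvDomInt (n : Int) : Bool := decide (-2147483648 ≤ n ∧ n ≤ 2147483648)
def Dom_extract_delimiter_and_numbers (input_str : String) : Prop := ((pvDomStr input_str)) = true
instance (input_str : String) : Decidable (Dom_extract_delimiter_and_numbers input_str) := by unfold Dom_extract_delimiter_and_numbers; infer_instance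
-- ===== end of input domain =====

-- B replaces A's repeated find()-based bracket-extraction loop with a single character-by-character
-- state-machine pass over the delimiter section (objective: alternative; same observable behaviour).

-- ===== PORT A =====
-- A's while loop: repeatedly find '[' from start_pos, then ']' after it, slice out the delimiter.
def pvAExtract (s : List Char) (start_pos : Nat) (acc : List (List Char)) : List (List Char) :=
  if hlt : start_pos < s.length then
    let ob := PySem.Chars.findFrom s ['['] (start_pos : Int) none
    if hob : ob = -1 then acc
    else
      let cb := PySem.Chars.findFrom s [']'] ob none
      if hcb : cb = -1 then acc
      else
        pvAExtract s (cb + 1).toNat (acc ++ [PySem.Chars.slice s (some (ob + 1)) (some cb)])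
  else acc
termination_by s.length - start_pos
decreasing_by
  have h1 : start_pos ≤ s.length := Nat.le_of_lt hlt
  obtain ⟨hso, hpre, -⟩ := PySem.Chars.findFrom_natCast_spec s ['['] start_pos h1 hob
  have hob0 : (0 : Int) ≤ ob := le_trans (by exact_mod_cast Nat.zero_le start_pos) hso
  have hoblt : ob.toNat < s.length := by
    have h2 := hpre.length_le
    rw [List.length_drop] at h2
    simp only [List.length_singleton] at h2
    omega
  have hcast : ob = ((ob.toNat : Nat) : Int) := (Int.toNat_of_nonneg hob0).symm
  set cb2 := PySem.Chars.findFrom s [']'] ((ob.toNat : Nat) : Int) none with hcb2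
  have hcb' : cb2 ≠ -1 := by
    rw [hcb2, ← hcast]; exact hcb
  obtain ⟨hsc, -, -⟩ := PySem.Chars.findFrom_natCast_spec s [']'] ob.toNat (Nat.le_of_lt hoblt) hcb'
  have hgoalcast : (PySem.Chars.findFrom s [']'] (PySem.Chars.findFrom s ['['] (start_pos : Int) none) none : Int) = cb2 := by
    rw [hcb2]
    show PySem.Chars.findFrom s [']'] ob none = _
    rw [← hcast]
  rw [hgoalcast]
  omega

def extract_delimiter_and_numbers (input_str : String) : String × String :=
  let special : List Char := "__MULTI_DELIM__".toList
  let cs := input_str.toList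
  let newline_pos := PySem.Chars.find cs ['\n']
  if newline_pos = -1 then (",", input_str)
  else
    let delimiters_section := PySem.Chars.slice cs (some 2) (some newline_pos)
    let numbers0 := PySem.Chars.slice cs (some (newline_pos + 1)) none
    let delimiters := pvAExtract delimiters_section 0 []
    let numbers1 := delimiters.foldl (fun n d => PySem.Chars.replace n d special) numbers0
    let numbers2 := PySem.Chars.replace numbers1 ['\n'] special
    (String.ofList special, String.ofList numbers2)

-- ===== PORT B =====
-- B's state machine: one pass; `buf = none` outside brackets, `some b` inside collecting chars.
def pvBScan (cs : List Char) (buf : Option (List Char)) (acc : List (List Char)) : List (List Char) :=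
  match cs, buf with
  | [], _ => acc
  | c :: rest, none => if c = '[' then pvBScan rest (some []) acc else pvBScan rest none acc
  | c :: rest, some b => if c = ']' then pvBScan rest none (acc ++ [b]) else pvBScan rest (some (b ++ [c])) acc

def extract_delimiter_and_numbers_alt (input_str : String) : String × String :=
  let special : List Char := "__MULTI_DELIM__".toList
  let cs := input_str.toList
  let newline_pos := PySem.Chars.find cs ['\n']
  if newline_pos = -1 then (",", input_str)
  else
    let numbers0 := PySem.Chars.slice cs (some (newline_pos + 1)) none
    let delimiters := pvBScan (PySem.Chars.slice cs (some 2) (some newline_pos)) none []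
    let numbers := (delimiters ++ [['\n']]).foldl (fun n d => PySem.Chars.replace n d special) numbers0
    (String.ofList special, String.ofList numbers)

-- ===== PRECONDITION & SPEC =====
def Spec_extract_delimiter_and_numbers (input_str : String) (out : String × String) : Prop := out = extract_delimiter_and_numbers_alt input_str
instance (input_str : String) (out : String × String) : Decidable (Spec_extract_delimiter_and_numbers input_str out) := by unfold Spec_extract_delimiter_and_numbers; infer_instance

-- ===== CLAIM (what is proved, stated in full; the proofs are below) =====
def Claim_equal_extract_delimiter_and_numbers : Prop := ∀ (input_str : String), Dom_extract_delimiter_and_numbers input_str → Spec_extract_delimiter_and_numbers input_str (extract_delimiter_and_numbers input_str)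

-- ===== LEMMAS AND PROOFS =====

lemma pvScan_no_open (cs : List Char) (acc : List (List Char)) (h : '[' ∉ cs) :
    pvBScan cs none acc = acc := by
  induction cs with
  | nil => rfl
  | cons c rest ih =>
    simp only [List.mem_cons, not_or] at h
    simp [pvBScan, ih h.2, if_neg (Ne.symm h.1)]

lemma pvScan_skip (p rest : List Char) (acc : List (List Char)) (h : '[' ∉ p) :
    pvBScan (p ++ rest) none acc = pvBScan rest none acc := by
  induction p with
  | nil => rfl
  | cons c q ih =>
    simp only [List.mem_cons, not_or] at h
    simp [pvBScan, if_neg (Ne.symm h.1), ih h.2]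

lemma pvScan_no_close (cs : List Char) (b : List Char) (acc : List (List Char)) (h : ']' ∉ cs) :
    pvBScan cs (some b) acc = acc := by
  induction cs generalizing b with
  | nil => rfl
  | cons c rest ih =>
    simp only [List.mem_cons, not_or] at h
    simp [pvBScan, if_neg (Ne.symm h.1), ih _ h.2]

lemma pvScan_inside (p rest : List Char) (b : List Char) (acc : List (List Char)) (h : ']' ∉ p) :
    pvBScan (p ++ ']' :: rest) (some b) acc = pvBScan rest none (acc ++ [b ++ p]) := by
  induction p generalizing b with
  | nil => simp [pvBScan]
  | cons c q ih =>
    simp only [List.mem_cons, not_or] at h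
    simp only [List.cons_append, pvBScan, if_neg (Ne.symm h.1), ih _ h.2]
    simp

lemma pvPrefix_singleton_drop {cs : List Char} {c : Char} {i : Nat} (h : i < cs.length) :
    [c] <+: cs.drop i ↔ cs[i] = c := by
  rw [List.drop_eq_getElem_cons h, List.cons_prefix_cons]
  simp [eq_comm]

lemma pvNotMemTake {l : List Char} {c : Char} {m : Nat}
    (h : ∀ j (_ : j < l.length), j < m → l[j] ≠ c) : c ∉ l.take m := by
  intro hmem
  obtain ⟨k, hk, hkc⟩ := List.mem_iff_getElem.mp hmem
  have hk' : k < l.length := by simp [List.length_take] at hk; omega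
  have hkm : k < m := by simp [List.length_take] at hk; omega
  exact h k hk' hkm (by rw [← List.getElem_take (h := hk)]; exact hkc)

lemma pvA_eq_scan : ∀ (n : Nat) (s : List Char) (start : Nat) (acc : List (List Char)),
    s.length - start = n → start ≤ s.length →
    pvAExtract s start acc = pvBScan (s.drop start) none acc := by
  intro n
  induction n using Nat.strong_induction_on with
  | _ n ih =>
    intro s start acc hn hle
    rw [pvAExtract.eq_def]
    by_cases hlt : start < s.length
    · simp only [dif_pos hlt]
      have hle' : start ≤ s.length := Nat.le_of_lt hlt
      have hff := PySem.Chars.findFrom_natCast s ['['] start hle'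
      by_cases hmem : '[' ∈ s.drop start
      · -- '[' occurs in the remaining section
        have hinf : ['['] <:+: s.drop start := (List.singleton_infix_iff _ _).mpr hmem
        have hfne : PySem.Chars.find (s.drop start) ['['] ≠ -1 :=
          (PySem.Chars.find_ne_neg_one_iff _ _).mpr hinf
        have hf0 : 0 ≤ PySem.Chars.find (s.drop start) ['['] :=
          (PySem.Chars.find_nonneg_iff _ _).mpr hinf
        set i := (PySem.Chars.find (s.drop start) ['[']).toNat with hi
        obtain ⟨hp1, hp2⟩ := PySem.Chars.find_spec (s := s.drop start) (sub := ['[']) hf0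
        have hilen : i < (s.drop start).length := by
          have h2 := hp1.length_le
          rw [List.length_drop] at h2
          simp only [List.length_singleton] at h2
          omega
        have hti : (s.drop start)[i] = '[' := (pvPrefix_singleton_drop hilen).mp hp1
        have htj : ∀ j (_ : j < (s.drop start).length), j < i → (s.drop start)[j] ≠ '[' := by
          intro j hj hji hc
          exact hp2 j hji ((pvPrefix_singleton_drop hj).mpr hc)
        have hob : PySem.Chars.findFrom s ['['] (start : Int) none = ((start + i : Nat) : Int) := by
          rw [hff, if_neg hfne]
          omega
        rw [hob]
        have hobne : ¬ (((start + i : Nat) : Int) = -1) := by omega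
        simp only [dif_neg hobne]
        have hle2 : start + i ≤ s.length := by
          rw [List.length_drop] at hilen; omega
        have hff2 := PySem.Chars.findFrom_natCast s [']'] (start + i) hle2
        have hdrop1 : s.drop (start + i) = (s.drop start).drop i := by rw [List.drop_drop]
        have hcons : (s.drop start).drop i = '[' :: (s.drop start).drop (i + 1) := by
          rw [List.drop_eq_getElem_cons hilen, hti]
        set u := (s.drop start).drop (i + 1) with hu
        have hnotintake : '[' ∉ (s.drop start).take i := pvNotMemTake htj
        have hBhead : pvBScan (s.drop start) none acc = pvBScan u (some []) acc := by
          conv_lhs => rw [← List.take_append_drop i (s.drop start)]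
          rw [pvScan_skip _ _ _ hnotintake, hcons]
          simp [pvBScan]
        by_cases hmem2 : ']' ∈ u
        · -- a closing bracket follows
          have hinf2 : [']'] <:+: '[' :: u := (List.singleton_infix_iff _ _).mpr (by simp [hmem2])
          have hfne2 : PySem.Chars.find ('[' :: u) [']'] ≠ -1 :=
            (PySem.Chars.find_ne_neg_one_iff _ _).mpr hinf2
          have hf02 : 0 ≤ PySem.Chars.find ('[' :: u) [']'] :=
            (PySem.Chars.find_nonneg_iff _ _).mpr hinf2
          set j := (PySem.Chars.find ('[' :: u) [']']).toNat with hj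
          obtain ⟨hq1, hq2⟩ := PySem.Chars.find_spec (s := '[' :: u) (sub := [']']) hf02
          have hjlen : j < ('[' :: u).length := by
            have h2 := hq1.length_le
            rw [List.length_drop] at h2
            simp only [List.length_singleton] at h2
            omega
          have htj2 : ('[' :: u)[j] = ']' := (pvPrefix_singleton_drop hjlen).mp hq1
          have hjpos : 1 ≤ j := by
            by_contra h0
            have hj0 : j = 0 := by omega
            have hq1' : [']'] <+: ('[' :: u).drop j := hq1
            rw [hj0, List.drop_zero] at hq1'
            rcases List.cons_prefix_cons.mp hq1' with ⟨h1, -⟩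
            exact absurd h1 (by decide)
          have hcb : PySem.Chars.findFrom s [']'] (((start + i : Nat) : Int)) none
              = ((start + i + j : Nat) : Int) := by
            rw [hff2, hdrop1, hcons, if_neg hfne2]
            push_cast [hj, Int.toNat_of_nonneg hf02]
            ring
          rw [hcb]
          have hcbne : ¬ (((start + i + j : Nat) : Int) = -1) := by omega
          simp only [dif_neg hcbne]
          -- the delimiter slice is u.take (j-1)
          have hslice : PySem.Chars.slice s (some (((start + i : Nat) : Int) + 1)) (some ((start + i + j : Nat) : Int))
              = u.take (j - 1) := by
            have : (((start + i : Nat) : Int) + 1) = ((start + i + 1 : Nat) : Int) := by push_cast; ring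
            rw [this]
            simp only [PySem.Chars.slice_eq_listSlice, PySem.List.slice_natCast]
            rw [hu, List.drop_drop]
            congr 1
            omega
          have hmlen : j - 1 < u.length := by simp at hjlen; omega
          have hdropc : ('[' :: u).drop j = u.drop (j - 1) := by
            conv_lhs => rw [show j = (j - 1) + 1 from by omega]
            rw [List.drop_succ_cons]
          have hum : u[j - 1]'hmlen = ']' :=
            (pvPrefix_singleton_drop hmlen).mp (by rw [← hdropc]; exact hq1)
          have husplit : u = u.take (j - 1) ++ ']' :: u.drop j := by
            conv_lhs => rw [← List.take_append_drop (j - 1) u]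
            rw [List.drop_eq_getElem_cons hmlen, hum, show j - 1 + 1 = j from by omega]
          have hnc : ']' ∉ u.take (j - 1) := by
            apply pvNotMemTake
            intro k hk hkm hc
            have : ('[' :: u)[k + 1] = ']' := by simpa using hc
            exact hq2 (k + 1) (by omega) ((pvPrefix_singleton_drop (by simp; omega)).mpr this)
          -- next start position
          have harg : ((((start + i + j : Nat) : Int)) + 1).toNat = start + i + j + 1 := by omega
          have hjlt : start + i + j < s.length := by
            rw [List.length_drop] at hilen
            simp [hu, List.length_drop] at hjlen
            omega
          have hrec := ih (s.length - (start + i + j + 1)) (by omega) s (start + i + j + 1)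
            (acc ++ [u.take (j - 1)]) rfl (by omega)
          have hdroprec : s.drop (start + i + j + 1) = u.drop j := by
            rw [hu, List.drop_drop, List.drop_drop]
            congr 1
            omega
          rw [hslice, harg, hrec, hdroprec, hBhead]
          conv_rhs => rw [husplit]
          rw [pvScan_inside _ _ _ _ hnc]
          simp
        · -- no closing bracket: A breaks, B's open buffer is discarded
          have hfind2 : PySem.Chars.find ('[' :: u) [']'] = -1 := by
            rw [PySem.Chars.find_eq_neg_one_iff, List.singleton_infix_iff]
            simp [hmem2]
          have hcb : PySem.Chars.findFrom s [']'] (((start + i : Nat) : Int)) none = -1 := by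
            rw [hff2, hdrop1, hcons, if_pos hfind2]
          rw [hcb, hBhead, pvScan_no_close _ _ _ hmem2]
          exact dif_pos rfl
      · -- no '[' in the remaining section: both return acc
        have hfind : PySem.Chars.find (s.drop start) ['['] = -1 := by
          rw [PySem.Chars.find_eq_neg_one_iff, List.singleton_infix_iff]
          exact hmem
        rw [pvScan_no_open _ _ hmem]
        rw [hff, if_pos hfind]
        simp
    · have : s.length ≤ start := Nat.le_of_not_lt hlt
      simp only [dif_neg hlt]
      rw [List.drop_eq_nil_of_le this]
      rfl

-- ===== VERDICT (by name: the statement is the Claim_ definition above) =====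
theorem extract_delimiter_and_numbers_spec : Claim_equal_extract_delimiter_and_numbers := by
  intro input_str _
  unfold Spec_extract_delimiter_and_numbers extract_delimiter_and_numbers extract_delimiter_and_numbers_alt
  simp only []
  by_cases h : PySem.Chars.find input_str.toList ['\n'] = -1
  · simp [h]
  · simp only [if_neg h]
    rw [pvA_eq_scan _ _ 0 [] rfl (Nat.zero_le _)]
    simp [List.foldl_append]
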